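-- pv_equiv track=rewrite | github.com/ervrv/gazprombank_tasks | task_1.py | get_rows_with_common_ids
-- ===== SOURCE A (Python) =====
-- def get_rows_with_common_ids(rows: set[tuple]) -> list[tuple]:
--     """
--     Collects rows with common ids and different content.
--     :param rows: set of tuples with id as last element
--     :return: list of tuples with common id
--     """
--     ids = set()
--     common_ids = set()
--     for row in rows:
--         if row[-1] in ids:
--             common_ids.add(row[-1])
--         else:
--             ids.add(row[-1])
--
--     rows_with_common_ids = filter(lambda r: r[-1] in common_ids, rows)
--     result_rows = list(rows_with_common_ids)
--     # result_rows = sorted(rows_with_common_ids, key=lambda r: r[-1])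
--     return result_rows
-- ===== SOURCE B (Python) =====
-- def get_rows_with_common_ids(rows):
--     rows = list(rows)
--     return [r for i, r in enumerate(rows)
--             if any(j != i and s[-1] == r[-1] for j, s in enumerate(rows))]
-- ===== Notes on version B (the rewrite author's own statement) =====
-- stated objective: alternative
-- what changed: Drops A's seen/common auxiliary sets entirely: B keeps a row iff some other position holds the same last element, decided by a direct pairwise scan over enumerate(rows), trading A's hash-set bookkeeping for an index-based quadratic comparison.
import Mathlib
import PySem

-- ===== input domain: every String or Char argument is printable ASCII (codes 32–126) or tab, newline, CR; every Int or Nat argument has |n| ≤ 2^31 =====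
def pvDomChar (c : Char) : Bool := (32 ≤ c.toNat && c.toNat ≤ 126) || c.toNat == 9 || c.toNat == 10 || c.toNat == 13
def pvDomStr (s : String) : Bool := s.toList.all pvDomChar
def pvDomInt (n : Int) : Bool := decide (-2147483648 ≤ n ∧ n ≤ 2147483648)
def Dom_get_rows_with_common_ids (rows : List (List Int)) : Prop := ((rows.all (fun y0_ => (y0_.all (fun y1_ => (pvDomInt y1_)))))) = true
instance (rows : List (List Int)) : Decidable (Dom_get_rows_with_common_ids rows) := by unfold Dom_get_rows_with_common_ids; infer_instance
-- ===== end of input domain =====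

-- B drops A's seen/common auxiliary sets: it keeps a row iff some OTHER position
-- holds the same last element, by a direct pairwise scan (objective: alternative).

-- row[-1]; total form, exact under Pre_ (every row nonempty)
def pvLast (r : List Int) : Int := (PySem.List.pyGet? r (-1)).getD 0

-- ===== PORT A =====
def get_rows_with_common_ids (rows : List (List Int)) : List (List Int) :=
  let st := rows.foldl
    (fun (p : PySem.Set Int × PySem.Set Int) row =>
      if PySem.Set.contains p.1 (pvLast row) then
        (p.1, PySem.Set.add p.2 (pvLast row))
      else
        (PySem.Set.add p.1 (pvLast row), p.2))
    (PySem.Set.empty, PySem.Set.empty)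
  rows.filter (fun r => PySem.Set.contains st.2 (pvLast r))

-- ===== PORT B =====
def get_rows_with_common_ids_alt (rows : List (List Int)) : List (List Int) :=
  ((PySem.List.enumerate rows).filter
    (fun p => (PySem.List.enumerate rows).any
      (fun q => q.1 != p.1 && pvLast q.2 == pvLast p.2))).map (·.2)

-- ===== PRECONDITION & SPEC =====
-- Pre_ excludes inputs containing an empty row, on which A raises IndexError at row[-1]
def Pre_get_rows_with_common_ids (rows : List (List Int)) : Prop := ∀ r ∈ rows, r ≠ []
instance (rows : List (List Int)) : Decidable (Pre_get_rows_with_common_ids rows) := by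
  unfold Pre_get_rows_with_common_ids; infer_instance
def pvWitness_get_rows_with_common_ids : List (List Int) := [[1, 5], [2, 5], [3, 4]]

def Spec_get_rows_with_common_ids (rows : List (List Int)) (out : List (List Int)) : Prop :=
  out = get_rows_with_common_ids_alt rows
instance (rows : List (List Int)) (out : List (List Int)) : Decidable (Spec_get_rows_with_common_ids rows out) := by
  unfold Spec_get_rows_with_common_ids; infer_instance

-- ===== CLAIM (what is proved, stated in full; the proofs are below) =====
def Claim_equal_get_rows_with_common_ids : Prop :=
  ∀ (rows : List (List Int)), Dom_get_rows_with_common_ids rows →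
    Pre_get_rows_with_common_ids rows →
    Spec_get_rows_with_common_ids rows (get_rows_with_common_ids rows)

-- ===== LEMMAS AND PROOFS =====

-- A's loop: the second (common) set of the fold contains x iff it did already,
-- or x was already in the first set and occurs among l's ids, or it occurs twice in l.
theorem foldA_mem (l : List (List Int)) (ids com : PySem.Set Int) (x : Int) :
    (x ∈ (l.foldl
      (fun (p : PySem.Set Int × PySem.Set Int) row =>
        if PySem.Set.contains p.1 (pvLast row) then
          (p.1, PySem.Set.add p.2 (pvLast row))
        else
          (PySem.Set.add p.1 (pvLast row), p.2)) (ids, com)).2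
      ↔ x ∈ com ∨ (x ∈ ids ∧ x ∈ l.map pvLast) ∨ 2 ≤ (l.map pvLast).count x)
    ∧ (x ∈ (l.foldl
      (fun (p : PySem.Set Int × PySem.Set Int) row =>
        if PySem.Set.contains p.1 (pvLast row) then
          (p.1, PySem.Set.add p.2 (pvLast row))
        else
          (PySem.Set.add p.1 (pvLast row), p.2)) (ids, com)).1
      ↔ x ∈ ids ∨ x ∈ l.map pvLast) := by
  induction l generalizing ids com with
  | nil => simp
  | cons r t ih =>
    simp only [List.foldl_cons, List.map_cons]
    by_cases hb : PySem.Set.contains ids (pvLast r) = true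
    · have h : pvLast r ∈ ids := (PySem.Set.contains_iff _ _).mp hb
      rw [if_pos hb]
      obtain ⟨h2, h1⟩ := ih ids (PySem.Set.add com (pvLast r))
      refine ⟨h2.trans ?_, h1.trans ?_⟩
      · by_cases hx : x = pvLast r
        · subst hx
          exact iff_of_true
            (Or.inl (by simp [PySem.Set.mem_add]))
            (Or.inr (Or.inl ⟨h, by simp⟩))
        · have hne : ¬ (pvLast r = x) := fun hh => hx hh.symm
          simp only [PySem.Set.mem_add, hx, or_false, List.mem_cons,
            List.count_cons, beq_iff_eq, if_neg hne, add_zero, false_or]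
      · by_cases hx : x = pvLast r
        · subst hx
          exact iff_of_true (Or.inl h) (Or.inl h)
        · simp [hx]
    · have h : pvLast r ∉ ids := fun hm => hb ((PySem.Set.contains_iff _ _).mpr hm)
      rw [if_neg hb]
      obtain ⟨h2, h1⟩ := ih (PySem.Set.add ids (pvLast r)) com
      refine ⟨h2.trans ?_, h1.trans ?_⟩
      · by_cases hx : x = pvLast r
        · subst hx
          have hm_iff : pvLast r ∈ t.map pvLast ↔ 1 ≤ (t.map pvLast).count (pvLast r) := by
            rw [← List.count_pos_iff]
            omega
          simp only [PySem.Set.mem_add, List.mem_cons, List.count_cons_self, h,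
            false_and, false_or, or_true, true_and, false_or, true_or]
          by_cases hcm : pvLast r ∈ com
          · simp [hcm]
          · simp only [hcm, false_or]
            rw [hm_iff]
            omega
        · have hne : ¬ (pvLast r = x) := fun hh => hx hh.symm
          simp only [PySem.Set.mem_add, hx, or_false, List.mem_cons,
            List.count_cons, beq_iff_eq, if_neg hne, add_zero, false_or]
      · by_cases hx : x = pvLast r
        · subst hx
          exact iff_of_true (Or.inl (by simp [PySem.Set.mem_add])) (Or.inr (by simp))
        · simp [PySem.Set.mem_add, hx]

-- Pure index fact: a value at position k recurs at another position iff it occurs ≥ 2 times.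
theorem exists_ne_idx_iff_two_le_count (l : List Int) (k : Nat) (hk : k < l.length) :
    (∃ j, ∃ _ : j < l.length, j ≠ k ∧ l[j] = l[k]) ↔ 2 ≤ l.count l[k] := by
  have hsplit : l[k] :: l.drop (k+1) = l.drop k := (List.drop_eq_getElem_cons hk).symm
  have hgen : ∀ x : Int, l.count x = (l.take k).count x + (l[k] :: l.drop (k+1)).count x := by
    intro x
    conv_lhs => rw [← List.take_append_drop k l]
    rw [List.count_append, ← hsplit]
  have hcnt : l.count l[k]
      = (l.take k).count l[k] + (1 + (l.drop (k+1)).count l[k]) := by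
    rw [hgen l[k], List.count_cons_self]
    ring
  constructor
  · rintro ⟨j, hj, hne, heq⟩
    rcases Nat.lt_or_ge j k with hlt | hge
    · have : l[k] ∈ l.take k := by
        rw [← heq]
        have : (l.take k)[j]'(by simp; omega) = l[j] := List.getElem_take
        rw [← this]; exact List.getElem_mem _
      have := List.count_pos_iff.mpr this
      omega
    · have hgt : k + 1 ≤ j := by omega
      have : l[k] ∈ l.drop (k+1) := by
        rw [← heq]
        have : (l.drop (k+1))[j - (k+1)]'(by simp; omega) = l[j] := by
          rw [List.getElem_drop]; congr 1; omega
        rw [← this]; exact List.getElem_mem _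
      have := List.count_pos_iff.mpr this
      omega
  · intro h2
    have : 0 < (l.take k).count l[k] ∨ 0 < (l.drop (k+1)).count l[k] := by omega
    rcases this with h | h
    · obtain ⟨j, hj, heq⟩ := List.getElem_of_mem (List.count_pos_iff.mp h)
      have hjk : j < k := by simp at hj; omega
      refine ⟨j, by omega, by omega, ?_⟩
      rw [← heq]; exact List.getElem_take.symm
    · obtain ⟨j, hj, heq⟩ := List.getElem_of_mem (List.count_pos_iff.mp h)
      have hjl : k + 1 + j < l.length := by simp at hj; omega
      refine ⟨k + 1 + j, hjl, by omega, ?_⟩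
      rw [← heq, List.getElem_drop]

-- B's inner 'any' over enumerate decides exactly '2 ≤ count of this id'.
theorem anyB_iff (rows : List (List Int)) (k : Nat) (hk : k < rows.length) :
    ((PySem.List.enumerate rows).any
      (fun q => q.1 != (k : Int) && pvLast q.2 == pvLast rows[k]) = true
      ↔ 2 ≤ (rows.map pvLast).count (pvLast rows[k])) := by
  rw [List.any_eq_true]
  have hk' : k < (rows.map pvLast).length := by simpa using hk
  have hmk : (rows.map pvLast)[k] = pvLast rows[k] := List.getElem_map _
  rw [← hmk, ← exists_ne_idx_iff_two_le_count _ k hk']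
  constructor
  · rintro ⟨q, hq, hpred⟩
    obtain ⟨j, hj, rfl⟩ := (PySem.List.mem_enumerate_iff _ _ _).mp hq
    simp only [Bool.and_eq_true, bne_iff_ne, beq_iff_eq] at hpred
    refine ⟨j, by simpa using hj, ?_, ?_⟩
    · intro h; exact hpred.1 (by simp [h])
    · simpa [List.getElem_map] using hpred.2
  · rintro ⟨j, hj, hne, heq⟩
    have hj' : j < rows.length := by simpa using hj
    refine ⟨((0 : Int) + j, rows[j]), (PySem.List.mem_enumerate_iff _ _ _).mpr ⟨j, hj', rfl⟩, ?_⟩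
    simp only [Bool.and_eq_true, bne_iff_ne, beq_iff_eq]
    constructor
    · intro h; apply hne; omega
    · simpa [List.getElem_map] using heq

-- ===== VERDICT (by name: the statement is the Claim_ definition above) =====
theorem get_rows_with_common_ids_spec : Claim_equal_get_rows_with_common_ids := by
  intro rows _ _
  unfold Spec_get_rows_with_common_ids
  have hA : get_rows_with_common_ids rows
      = rows.filter (fun r => decide (2 ≤ (rows.map pvLast).count (pvLast r))) := by
    unfold get_rows_with_common_ids
    apply List.filter_congr
    intro r _
    have hd := (foldA_mem rows PySem.Set.empty PySem.Set.empty (pvLast r)).1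
    rw [Bool.eq_iff_iff, PySem.Set.contains_iff, decide_eq_true_iff, hd]
    simp [PySem.Set.empty]
  have hB : get_rows_with_common_ids_alt rows
      = rows.filter (fun r => decide (2 ≤ (rows.map pvLast).count (pvLast r))) := by
    unfold get_rows_with_common_ids_alt
    have hcong : ∀ p ∈ PySem.List.enumerate rows,
        ((PySem.List.enumerate rows).any (fun q => q.1 != p.1 && pvLast q.2 == pvLast p.2))
        = decide (2 ≤ (rows.map pvLast).count (pvLast p.2)) := by
      intro p hp
      obtain ⟨k, hk, rfl⟩ := (PySem.List.mem_enumerate_iff _ _ _).mp hp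
      rw [Bool.eq_iff_iff, decide_eq_true_iff]
      simpa using anyB_iff rows k hk
    rw [List.filter_congr hcong]
    have hx : ((PySem.List.enumerate rows).filter
          (fun p => decide (2 ≤ (rows.map pvLast).count (pvLast p.2)))).map (·.2)
        = ((PySem.List.enumerate rows).map (·.2)).filter
          (fun r => decide (2 ≤ (rows.map pvLast).count (pvLast r))) := by
      rw [List.filter_map]; rfl
    rw [hx, PySem.List.map_snd_enumerate]
  rw [hA, hB]
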